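-- pv_equiv track=rewrite | github.com/ejrcarr/ResearchCurrent | TimeTests/testing_latin_squares.py | generateValidRows
-- ===== SOURCE A (Python) =====
-- def permutations(iterable, r=None):
--     # permutations('ABCD', 2) --> AB AC AD BA BC BD CA CB CD DA DB DC
--     # permutations(range(3)) --> 012 021 102 120 201 210
--     pool = tuple(iterable)
--     n = len(pool)
--     r = n if r is None else r
--     if r > n:
--         return
--     indices = list(range(n))
--     cycles = list(range(n, n-r, -1))
--     yield list(pool[i] for i in indices[:r])
--     while n:
--         for i in reversed(range(r)):
--             cycles[i] -= 1
--             if cycles[i] == 0: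
--                 indices[i:] = indices[i+1:] + indices[i:i+1]
--                 cycles[i] = n - i
--             else:
--                 j = cycles[i]
--                 indices[i], indices[-j] = indices[-j], indices[i]
--                 yield list(pool[i] for i in indices[:r])
--                 break
--         else:
--             return
--
-- def generateValidRows(row):
--     totalSum = sum(row)
--     permutations(row, len(row) - 1)
--     currSum = 0
--     validRowsSizeNMinusOne = list(permutations(row, len(row) - 1))
--     for i in validRowsSizeNMinusOne:
--         for j in range(len(i)):
--             currSum += i[j]
--         i.append(totalSum-currSum)
--         currSum = 0
--     return validRowsSizeNMinusOne[:]
-- ===== SOURCE B (Python) =====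
-- def generateValidRows(row):
--     total = sum(row)
--
--     def perms(lst, r):
--         # all length-r permutations of lst, picking positions left-to-right
--         if r <= 0:
--             yield []
--             return
--         for i in range(len(lst)):
--             rest = lst[:i] + lst[i + 1:]
--             for p in perms(rest, r - 1):
--                 yield [lst[i]] + p
--
--     return [p + [total - sum(p)] for p in perms(row, len(row) - 1)]
-- ===== Notes on version B (the rewrite author's own statement) =====
-- stated objective: simpler
-- what changed: Replaces A's hand-written Knuth index/cycle permutation iterator (mutating indices/cycles arrays with swaps and rotations) and its per-row inner summation loop by a short recursive generator that picks positions left-to-right and appends total - sum(p) directly.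
import Mathlib
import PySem

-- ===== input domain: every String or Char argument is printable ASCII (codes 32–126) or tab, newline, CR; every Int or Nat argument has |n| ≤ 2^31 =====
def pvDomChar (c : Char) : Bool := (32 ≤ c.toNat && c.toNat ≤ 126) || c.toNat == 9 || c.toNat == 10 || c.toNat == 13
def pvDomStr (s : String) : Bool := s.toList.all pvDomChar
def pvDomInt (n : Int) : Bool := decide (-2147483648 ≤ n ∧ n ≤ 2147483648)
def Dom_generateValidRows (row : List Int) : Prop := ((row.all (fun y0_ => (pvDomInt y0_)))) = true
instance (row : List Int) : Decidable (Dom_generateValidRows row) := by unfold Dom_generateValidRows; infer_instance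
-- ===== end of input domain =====

-- B replaces A's hand-written Knuth index/cycle permutation iterator by a simple recursive
-- position-picking generator (prepend lst[i] to every permutation of the rest), same values.

-- ===== PORT A =====

-- pool[ix] for an Int index drawn from `indices` (A only ever indexes in range)
def pvPoolGet (pool : List Int) (ix : Int) : Int := (PySem.List.pyGet? pool ix).getD 0

-- the body `for i in reversed(range(r)) … else: return` of A's permutations generator:
-- `none` = the for-else `return`; `some` = the state after a `yield`, with the yielded row.
-- (Python's `indices[-j]` with 1 ≤ j ≤ n is position n - j; A maintains that invariant.)
def pvInner (pool : List Int) (n : Int) (rr : Nat) :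
    Nat → List Int → List Int → Option (List Int × List Int × List Int)
  | 0, _, _ => none
  | i + 1, indices, cycles =>
      let c := cycles[i]?.getD 0 - 1                      -- cycles[i] -= 1
      let cycles1 := cycles.set i c
      if c = 0 then
        -- indices[i:] = indices[i+1:] + indices[i:i+1]; cycles[i] = n - i
        let indices1 := indices.take i ++ indices.drop (i + 1) ++ (indices.drop i).take 1
        let cycles2 := cycles1.set i (n - (i : Int))
        pvInner pool n rr i indices1 cycles2
      else
        -- j = cycles[i]; swap indices[i] and indices[-j]; yield pool values of indices[:r]
        let p := (n - c).toNat
        let a := indices[i]?.getD 0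
        let b := indices[p]?.getD 0
        let indices1 := (indices.set i b).set p a
        some (indices1, cycles1, (indices1.take rr).map (pvPoolGet pool))

-- the `while n:` loop; fuel only bounds the iteration count (never exhausted, see proofs)
def pvOuter (pool : List Int) (n : Int) (rr : Nat) :
    Nat → List Int → List Int → List (List Int)
  | 0, _, _ => []
  | fuel + 1, indices, cycles =>
      match pvInner pool n rr rr indices cycles with
      | none => []
      | some (ind, cyc, out) => out :: pvOuter pool n rr fuel ind cyc

-- list(permutations(pool, r)) for A's hand-written generator
def pvPermutationsList (pool : List Int) (r : Int) : List (List Int) :=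
  let n : Int := pool.length
  if r > n then []
  else
    let indices : List Int := (List.range pool.length).map Int.ofNat
    let cycles : List Int := PySem.List.pyRange n (n - r) (-1)
    let first := (PySem.List.slice indices none (some r)).map (pvPoolGet pool)
    first :: (if n = 0 then [] else
      pvOuter pool n r.toNat (pool.length ^ pool.length + 1) indices cycles)

def generateValidRows (row : List Int) : List (List Int) :=
  let totalSum := row.sum
  -- (A's bare `permutations(row, len(row) - 1)` statement creates a generator and discards it)
  let validRowsSizeNMinusOne := pvPermutationsList row ((row.length : Int) - 1)
  validRowsSizeNMinusOne.map (fun i =>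
    let currSum := (PySem.List.pyRange 0 i.length 1).foldl
      (fun s j => s + PySem.List.pyGetD i j 0) 0
    i ++ [totalSum - currSum])

-- ===== PORT B =====

-- all length-r permutations of lst, picking positions left to right
def pvPermsB (lst : List Int) (r : Int) : List (List Int) :=
  if r ≤ 0 then [[]]
  else
    (List.range lst.length).attach.flatMap (fun i =>
      (pvPermsB (lst.take i.1 ++ lst.drop (i.1 + 1)) (r - 1)).map
        (fun p => (lst[i.1]?.getD 0) :: p))
termination_by lst.length
decreasing_by
  have h : i.1 < lst.length := List.mem_range.mp i.2
  simp only [List.length_append, List.length_take, List.length_drop]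
  omega

def generateValidRows_alt (row : List Int) : List (List Int) :=
  let total := row.sum
  (pvPermsB row ((row.length : Int) - 1)).map (fun p => p ++ [total - p.sum])

-- ===== PRECONDITION & SPEC =====
def Spec_generateValidRows (row : List Int) (out : List (List Int)) : Prop := out = generateValidRows_alt row
instance (row : List Int) (out : List (List Int)) : Decidable (Spec_generateValidRows row out) := by unfold Spec_generateValidRows; infer_instance

-- ===== CLAIM (what is proved, stated in full; the proofs are below) =====
def Claim_equal_generateValidRows : Prop := ∀ (row : List Int), Dom_generateValidRows row → Spec_generateValidRows row (generateValidRows row)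

-- ===== LEMMAS AND PROOFS =====

-- choice vectors: ks picks, level by level, a position in the remaining pool.
-- pvSel = the selected elements; pvErem = the leftover pool; pvEnc = how A's `indices`
-- list encodes a state (selection, then the leftover pool).
def pvSel (rem : List Int) : List Nat → List Int
  | [] => []
  | k :: ks => rem.getD k 0 :: pvSel (rem.eraseIdx k) ks

def pvErem (rem : List Int) : List Nat → List Int
  | [] => rem
  | k :: ks => pvErem (rem.eraseIdx k) ks

def pvEnc (rem : List Int) : List Nat → List Int
  | [] => rem
  | k :: ks => rem.getD k 0 :: pvEnc (rem.eraseIdx k) ks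

-- A's `cycles` list for choice vector ks: entry at level j is n - j - ks[j]
def pvCyc (n : Int) : Int → List Nat → List Int
  | _, [] => []
  | j, k :: ks => (n - j - (k : Int)) :: pvCyc n (j + 1) ks

-- per-level maxima of the choice digits: pvMx m r = [m-1, m-2, …, m-r]
def pvMx : Nat → Nat → List Nat
  | _, 0 => []
  | m, r + 1 => (m - 1) :: pvMx (m - 1) r

def pvOK (ms ks : List Nat) : Prop := List.Forall₂ (fun m k => k ≤ m) ms ks

-- all choice vectors in lexicographic order
def pvAll : List Nat → List (List Nat)
  | [] => [[]]
  | m :: ms => (List.range (m + 1)).flatMap (fun k => (pvAll ms).map (k :: ·))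

-- lexicographic successor (mixed-radix +1), none at the maximum
def pvIncr : List Nat → List Nat → Option (List Nat)
  | [], [] => none
  | m :: ms, k :: ks =>
      match pvIncr ms ks with
      | some ks' => some (k :: ks')
      | none => if k < m then some ((k + 1) :: ms.map (fun _ => 0)) else none
  | _, _ => none

-- all choice vectors strictly after ks, in order
def pvTail : List Nat → List Nat → List (List Nat)
  | [], _ => []
  | m :: ms, k :: ks =>
      (pvTail ms ks).map (k :: ·) ++
        (List.range' (k + 1) (m - k)).flatMap (fun k' => (pvAll ms).map (k' :: ·))
  | _ :: _, [] => []

theorem pvSel_length (rem : List Int) (ks : List Nat) : (pvSel rem ks).length = ks.length := by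
  induction ks generalizing rem <;> simp [pvSel, *]

theorem pvCyc_length (n : Int) (j : Int) (ks : List Nat) : (pvCyc n j ks).length = ks.length := by
  induction ks generalizing j <;> simp [pvCyc, *]

theorem pvMx_length (m r : Nat) : (pvMx m r).length = r := by
  induction r generalizing m <;> simp [pvMx, *]

theorem pvMx_snoc (r : Nat) : ∀ m, pvMx m (r + 1) = pvMx m r ++ [m - 1 - r] := by
  induction r with
  | zero => intro m; simp [pvMx]
  | succ r ih =>
      intro m
      rw [show pvMx m (r + 2) = (m - 1) :: pvMx (m - 1) (r + 1) from rfl, ih (m - 1)]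
      simp [pvMx, Nat.sub_sub]
      ring_nf

theorem pvMx_mem_le : ∀ (r c m : Nat), m ∈ pvMx c r → m ≤ c - 1 := by
  intro r
  induction r with
  | zero => intro c m h; simp [pvMx] at h
  | succ r ih =>
      intro c m h
      simp only [pvMx, List.mem_cons] at h
      rcases h with rfl | h
      · exact Nat.le_refl _
      · have := ih (c - 1) m h; omega

theorem pvEnc_append (rem : List Int) (q ks : List Nat) :
    pvEnc rem (q ++ ks) = pvSel rem q ++ pvEnc (pvErem rem q) ks := by
  induction q generalizing rem <;> simp [pvEnc, pvSel, pvErem, *]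

theorem pvEnc_nil_append (rem : List Int) (q : List Nat) :
    pvEnc rem q = pvSel rem q ++ pvErem rem q := by
  have := pvEnc_append rem q []
  simpa [pvEnc] using this

theorem pvEnc_replicate (rem : List Int) (t : Nat) (h : t ≤ rem.length) :
    pvEnc rem (List.replicate t 0) = rem := by
  induction t generalizing rem with
  | zero => simp [pvEnc]
  | succ t ih =>
      cases rem with
      | nil => simp at h
      | cons a rem' =>
          simp [pvEnc, List.replicate_succ, List.eraseIdx]
          exact ih rem' (by simpa using h)

theorem pvSel_replicate (rem : List Int) (t : Nat) (h : t ≤ rem.length) :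
    pvSel rem (List.replicate t 0) = rem.take t := by
  induction t generalizing rem with
  | zero => simp [pvSel]
  | succ t ih =>
      cases rem with
      | nil => simp at h
      | cons a rem' =>
          simp [pvSel, List.replicate_succ, List.eraseIdx]
          exact ih rem' (by simpa using h)

theorem pvErem_length : ∀ (ks : List Nat) (rem : List Int) (c : Nat),
    rem.length = c → ks.length ≤ c → pvOK (pvMx c ks.length) ks →
    (pvErem rem ks).length = c - ks.length := by
  intro ks
  induction ks with
  | nil => intro rem c h _ _; simpa [pvErem] using h
  | cons k ks ih =>
      intro rem c h hlen hok
      simp only [List.length_cons] at hlen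
      simp only [List.length_cons] at hok
      rw [show pvMx c (ks.length + 1) = (c - 1) :: pvMx (c - 1) ks.length from rfl] at hok
      cases hok with
      | cons hk htl =>
          simp only [pvErem, List.length_cons]
          have hklt : k < c := by omega
          have herase : (rem.eraseIdx k).length = c - 1 := by
            rw [List.length_eraseIdx]; rw [h]; simp [hklt]
          have := ih (rem.eraseIdx k) (c - 1) herase (by omega) htl
          omega

theorem pvEnc_take (rem : List Int) (ks : List Nat) :
    (pvEnc rem ks).take ks.length = pvSel rem ks := by
  rw [pvEnc_nil_append]
  rw [show ks.length = (pvSel rem ks).length from (pvSel_length rem ks).symm]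
  exact List.take_left

theorem pvOK_zeros : ∀ (ms : List Nat), pvOK ms (ms.map (fun _ => 0)) := by
  intro ms
  induction ms with
  | nil => exact List.Forall₂.nil
  | cons m ms ih => exact List.Forall₂.cons (Nat.zero_le m) ih

theorem pvIncr_length : ∀ (ms ks ks' : List Nat), pvOK ms ks → pvIncr ms ks = some ks' →
    ks'.length = ks.length := by
  intro ms
  induction ms with
  | nil => intro ks ks' hok h; cases hok; simp [pvIncr] at h
  | cons m ms ih =>
      intro ks ks' hok h
      cases hok with
      | cons hk htl =>
          rename_i k ks0
          simp only [pvIncr] at h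
          cases h' : pvIncr ms ks0 with
          | some x =>
              rw [h'] at h
              cases h
              simp [ih ks0 x htl h']
          | none =>
              rw [h'] at h
              by_cases hkm : k < m
              · rw [if_pos hkm] at h
                cases h
                have hlen := List.Forall₂.length_eq htl
                simp [hlen]
              · rw [if_neg hkm] at h
                cases h

theorem pvIncr_ok : ∀ (ms ks ks' : List Nat), pvOK ms ks → pvIncr ms ks = some ks' → pvOK ms ks' := by
  intro ms
  induction ms with
  | nil => intro ks ks' hok h; cases hok; simp [pvIncr] at h
  | cons m ms ih =>
      intro ks ks' hok h
      cases hok with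
      | cons hk htl =>
          rename_i k ks0
          simp only [pvIncr] at h
          cases h' : pvIncr ms ks0 with
          | some x =>
              rw [h'] at h; cases h
              exact List.Forall₂.cons hk (ih ks0 x htl h')
          | none =>
              rw [h'] at h
              by_cases hkm : k < m
              · rw [if_pos hkm] at h
                cases h
                exact List.Forall₂.cons (by omega) (pvOK_zeros ms)
              · rw [if_neg hkm] at h
                cases h

theorem pvIncr_snoc : ∀ (ms q : List Nat) (m k : Nat), ms.length = q.length →
    pvIncr (ms ++ [m]) (q ++ [k]) =
      if k < m then some (q ++ [k + 1]) else (pvIncr ms q).map (· ++ [0]) := by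
  intro ms
  induction ms with
  | nil =>
      intro q m k hl
      cases q with
      | nil => simp [pvIncr]
      | cons _ _ => simp at hl
  | cons m0 ms ih =>
      intro q m k hl
      cases q with
      | nil => simp at hl
      | cons q0 q' =>
          simp only [List.length_cons] at hl
          simp only [List.cons_append, pvIncr]
          rw [ih q' m k (by omega)]
          by_cases hkm : k < m
          · simp [hkm]
          · simp only [hkm, if_false]
            cases h' : pvIncr ms q' with
            | some x => simp [h', pvIncr]
            | none =>
                simp only [h', Option.map_none]
                by_cases hq : q0 < m0
                · simp [hq, pvIncr, h']
                · simp [hq, pvIncr, h']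

theorem pvAll_zero : ∀ (ms : List Nat),
    pvAll ms = (ms.map (fun _ => 0)) :: pvTail ms (ms.map (fun _ => 0)) := by
  intro ms
  induction ms with
  | nil => simp [pvAll, pvTail]
  | cons m ms ih =>
      simp only [pvAll, List.map_cons, pvTail]
      rw [List.range_eq_range', List.range'_succ]
      simp only [List.flatMap_cons]
      rw [ih]
      simp

theorem pvTail_nil : ∀ (ms ks : List Nat), pvOK ms ks → pvIncr ms ks = none → pvTail ms ks = [] := by
  intro ms
  induction ms with
  | nil => intro ks hok _; cases hok; simp [pvTail]
  | cons m ms ih =>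
      intro ks hok h
      cases hok with
      | cons hk htl =>
          rename_i k ks0
          simp only [pvIncr] at h
          cases h' : pvIncr ms ks0 with
          | some x => rw [h'] at h; cases h
          | none =>
              rw [h'] at h
              by_cases hkm : k < m
              · rw [if_pos hkm] at h; cases h
              · have hkme : k = m := by omega
                simp only [pvTail, ih ks0 htl h', List.map_nil, List.nil_append, hkme]
                simp

theorem pvTail_cons : ∀ (ms ks ks' : List Nat), pvOK ms ks → pvIncr ms ks = some ks' →
    pvTail ms ks = ks' :: pvTail ms ks' := by
  intro ms
  induction ms with
  | nil => intro ks ks' hok h; cases hok; simp [pvIncr] at h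
  | cons m ms ih =>
      intro ks ks' hok h
      cases hok with
      | cons hk htl =>
          rename_i k ks0
          simp only [pvIncr] at h
          cases h' : pvIncr ms ks0 with
          | some x =>
              rw [h'] at h; cases h
              simp only [pvTail, ih ks0 x htl h']
              simp
          | none =>
              rw [h'] at h
              by_cases hkm : k < m
              · rw [if_pos hkm] at h
                cases h
                have hz : pvTail ms ks0 = [] := pvTail_nil ms ks0 htl h'
                simp only [pvTail, hz, List.map_nil, List.nil_append]
                rw [show m - k = (m - (k + 1)) + 1 by omega]
                rw [List.range'_succ]
                simp only [List.flatMap_cons]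
                rw [pvAll_zero ms]
                simp only [List.map_cons, List.cons_append]
              · rw [if_neg hkm] at h
                cases h


-- list surgery at a known boundary
theorem pvIdxAt (u : List Int) (z : Int) (t : List Int) :
    (u ++ z :: t)[u.length]?.getD 0 = z := by
  induction u with
  | nil => rfl
  | cons a u ih => simpa using ih

theorem pvSetAt (u : List Int) (z v : Int) (t : List Int) :
    (u ++ z :: t).set u.length v = u ++ v :: t := by
  induction u with
  | nil => rfl
  | cons a u ih => simpa using ih

theorem pvEraseAt (u : List Int) (z : Int) (t : List Int) :
    (u ++ z :: t).eraseIdx u.length = u ++ t := by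
  induction u with
  | nil => rfl
  | cons a u ih => simpa using ih

theorem pvGetDAt (u : List Int) (z : Int) (t : List Int) :
    (u ++ z :: t).getD u.length 0 = z := by
  induction u with
  | nil => rfl
  | cons a u ih => simpa using ih

theorem pvDecomp : ∀ (k : Nat) (R : List Int), k + 1 < R.length →
    ∃ u x y v, R = u ++ x :: y :: v ∧ u.length = k := by
  intro k
  induction k with
  | zero =>
      intro R h
      cases R with
      | nil => simp at h
      | cons x R' =>
          cases R' with
          | nil => simp at h
          | cons y v => exact ⟨[], x, y, v, rfl, rfl⟩
  | succ k ih =>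
      intro R h
      cases R with
      | nil => simp at h
      | cons a R' =>
          obtain ⟨u, x, y, v, hR, hu⟩ := ih R' (by simp at h; omega)
          exact ⟨a :: u, x, y, v, by simp [hR], by simp [hu]⟩

theorem pvOK_append_singleton : ∀ (ms q : List Nat) (m k : Nat), ms.length = q.length →
    pvOK (ms ++ [m]) (q ++ [k]) → pvOK ms q ∧ k ≤ m := by
  intro ms
  induction ms with
  | nil =>
      intro q m k hl hok
      cases q with
      | nil =>
          cases hok with
          | cons hk _ => exact ⟨List.Forall₂.nil, hk⟩
      | cons _ _ => simp at hl
  | cons m0 ms ih =>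
      intro q m k hl hok
      cases q with
      | nil => simp at hl
      | cons q0 q' =>
          cases hok with
          | cons h0 htl =>
              obtain ⟨h1, h2⟩ := ih q' m k (by simpa using hl) htl
              exact ⟨List.Forall₂.cons h0 h1, h2⟩

theorem pvCyc_append (n : Int) (q ks : List Nat) : ∀ j : Int,
    pvCyc n j (q ++ ks) = pvCyc n j q ++ pvCyc n (j + q.length) ks := by
  induction q with
  | nil => intro j; simp [pvCyc]
  | cons a q ih =>
      intro j
      simp only [List.cons_append, pvCyc, ih (j + 1), List.length_cons]
      rw [show (j + 1) + (q.length : Int) = j + ((q.length : Nat) + 1 : Nat) by push_cast; ring]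

theorem pvSel_map (g : Int → Int) : ∀ (ks : List Nat) (rem : List Int) (c : Nat),
    rem.length = c → ks.length ≤ c → pvOK (pvMx c ks.length) ks →
    (pvSel rem ks).map g = pvSel (rem.map g) ks := by
  intro ks
  induction ks with
  | nil => intro rem c _ _ _; simp [pvSel]
  | cons k ks ih =>
      intro rem c hc hlen hok
      simp only [List.length_cons, pvMx] at hok
      cases hok with
      | cons hk htl =>
          have hkc : k < c := by simp only [List.length_cons] at hlen; omega
          have hkr : k < rem.length := by omega
          simp only [pvSel, List.map_cons]
          congr 1
          · rw [List.getD_eq_getElem rem 0 hkr,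
              List.getD_eq_getElem (rem.map g) 0 (by simpa using hkr)]
            simp
          · rw [List.eraseIdx_map]
            exact ih (rem.eraseIdx k) (c - 1)
              (by rw [List.length_eraseIdx, if_pos hkr, hc])
              (by simp only [List.length_cons] at hlen; omega) htl

theorem pvAll_mem_ok : ∀ (ms ks : List Nat), ks ∈ pvAll ms → pvOK ms ks := by
  intro ms
  induction ms with
  | nil =>
      intro ks h
      simp [pvAll] at h
      subst h
      exact List.Forall₂.nil
  | cons m ms ih =>
      intro ks h
      simp only [pvAll, List.mem_flatMap, List.mem_map, List.mem_range] at h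
      obtain ⟨k, hk, ks0, hks0, rfl⟩ := h
      exact List.Forall₂.cons (by omega) (ih ks0 hks0)

theorem pvAll_len_le : ∀ (ms : List Nat) (b : Nat), (∀ m ∈ ms, m + 1 ≤ b) →
    (pvAll ms).length ≤ b ^ ms.length := by
  intro ms
  induction ms with
  | nil => intro b _; simp [pvAll]
  | cons m ms ih =>
      intro b hb
      have hm : m + 1 ≤ b := hb m (by simp)
      have ihms : (pvAll ms).length ≤ b ^ ms.length := ih b (fun x hx => hb x (by simp [hx]))
      simp only [pvAll, List.length_flatMap, List.length_cons]
      have hsum : ((List.range (m + 1)).map (fun k => ((pvAll ms).map (k :: ·)).length)).sum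
          = (m + 1) * (pvAll ms).length := by
        simp [List.map_const']
      rw [hsum, pow_succ]
      calc (m + 1) * (pvAll ms).length ≤ b * (pvAll ms).length :=
            Nat.mul_le_mul_right _ hm
        _ ≤ b * b ^ ms.length := Nat.mul_le_mul_left _ ihms
        _ = b ^ ms.length * b := by ring

-- the inner for-loop performs exactly one mixed-radix increment on the choice vector
theorem pvInner_step (pool : List Int) (r : Nat) (hr : r ≤ pool.length) :
    ∀ (i : Nat) (pre : List Nat), i ≤ r → pre.length = i → pvOK (pvMx pool.length i) pre →
    pvInner pool (pool.length : Int) r i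
        (pvEnc ((List.range pool.length).map Int.ofNat) (pre ++ List.replicate (r - i) 0))
        (pvCyc (pool.length : Int) 0 (pre ++ List.replicate (r - i) 0))
    = match pvIncr (pvMx pool.length i) pre with
      | none => none
      | some pre' =>
          some (pvEnc ((List.range pool.length).map Int.ofNat) (pre' ++ List.replicate (r - i) 0),
                pvCyc (pool.length : Int) 0 (pre' ++ List.replicate (r - i) 0),
                ((pvEnc ((List.range pool.length).map Int.ofNat)
                    (pre' ++ List.replicate (r - i) 0)).take r).map (pvPoolGet pool)) := by
  intro i
  induction i with
  | zero =>
      intro pre _ hl _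
      rw [List.length_eq_zero_iff] at hl
      subst hl
      simp [pvInner, pvMx, pvIncr]
  | succ i ih =>
      intro pre hir hl hok
      rcases List.eq_nil_or_concat pre with rfl | ⟨q, k, rfl⟩
      · simp at hl
      rw [List.concat_eq_append] at hl hok ⊢
      set np := pool.length with hnp
      set rem0 : List Int := (List.range np).map Int.ofNat with hrem0
      have hrem0len : rem0.length = np := by simp [hrem0]
      have hq : q.length = i := by simpa using hl
      have hmx : pvMx np (i + 1) = pvMx np i ++ [np - 1 - i] := pvMx_snoc i np
      rw [hmx] at hok
      obtain ⟨hokq, hk⟩ := pvOK_append_singleton _ _ _ _ (by rw [pvMx_length]; omega) hok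
      set M := np - 1 - i with hM
      set zs := List.replicate (r - (i + 1)) 0 with hzs
      have hre : (q ++ [k]) ++ List.replicate (r - (i + 1)) 0 = q ++ (k :: zs) := by
        simp [hzs]
      set R := pvErem rem0 q with hRdef
      set S := pvSel rem0 q with hSdef
      have hS : S.length = i := by rw [hSdef, pvSel_length, hq]
      have hinp : i + 1 ≤ np := le_trans hir hr
      have hR : R.length = np - i := by
        rw [hRdef]
        have h1 := pvErem_length q rem0 np hrem0len (by omega) (by rwa [hq])
        rw [hq] at h1; omega
      have hkR : k < R.length := by omega
      have hzsle : r - (i + 1) ≤ (R.eraseIdx k).length := by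
        rw [List.length_eraseIdx]
        simp only [hkR, if_pos]
        omega
      have hindices : pvEnc rem0 ((q ++ [k]) ++ List.replicate (r - (i + 1)) 0)
          = S ++ (R.getD k 0 :: R.eraseIdx k) := by
        rw [hre, pvEnc_append, ← hRdef, ← hSdef]
        congr 1
        rw [show pvEnc R (k :: zs) = R.getD k 0 :: pvEnc (R.eraseIdx k) zs from rfl]
        rw [hzs, pvEnc_replicate _ _ hzsle]
      have hcycles : pvCyc (np : Int) 0 ((q ++ [k]) ++ List.replicate (r - (i + 1)) 0)
          = pvCyc (np : Int) 0 q ++ (((np : Int) - i - k) :: pvCyc (np : Int) (i + 1) zs) := by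
        rw [hre, pvCyc_append, hq]
        rw [show ((0 : Int) + (i : Nat)) = (i : Int) by ring]
        rfl
      have hcyclen : (pvCyc (np : Int) 0 q).length = i := by rw [pvCyc_length, hq]
      have hcget : (pvCyc (np : Int) 0 q ++ (((np : Int) - i - k) :: pvCyc (np : Int) (i + 1) zs))[i]?.getD 0
          = (np : Int) - i - k := by
        rw [← hcyclen]
        exact pvIdxAt _ _ _
      rw [hindices, hcycles]
      rw [show pvInner pool (np : Int) r (i + 1)
            (S ++ (R.getD k 0 :: R.eraseIdx k))
            (pvCyc (np : Int) 0 q ++ (((np : Int) - i - k) :: pvCyc (np : Int) (i + 1) zs))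
          = (let c := (pvCyc (np : Int) 0 q ++ (((np : Int) - i - k) :: pvCyc (np : Int) (i + 1) zs))[i]?.getD 0 - 1
             let cycles1 := (pvCyc (np : Int) 0 q ++ (((np : Int) - i - k) :: pvCyc (np : Int) (i + 1) zs)).set i c
             if c = 0 then
               let indices1 := (S ++ (R.getD k 0 :: R.eraseIdx k)).take i
                   ++ (S ++ (R.getD k 0 :: R.eraseIdx k)).drop (i + 1)
                   ++ ((S ++ (R.getD k 0 :: R.eraseIdx k)).drop i).take 1
               let cycles2 := cycles1.set i ((np : Int) - (i : Int))
               pvInner pool (np : Int) r i indices1 cycles2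
             else
               let p := ((np : Int) - c).toNat
               let a := (S ++ (R.getD k 0 :: R.eraseIdx k))[i]?.getD 0
               let b := (S ++ (R.getD k 0 :: R.eraseIdx k))[p]?.getD 0
               let indices1 := ((S ++ (R.getD k 0 :: R.eraseIdx k)).set i b).set p a
               some (indices1, cycles1, (indices1.take r).map (pvPoolGet pool))) from rfl]
      simp only [hcget]
      by_cases hkM : k < M
      · -- swap case: digit i goes k → k+1, yield
        have hcne : ¬((np : Int) - (i : Int) - (k : Int) - 1 = 0) := by
          rw [hM] at hkM; omega
        simp only [if_neg hcne]
        have hp : (((np : Int)) - ((np : Int) - (i : Int) - (k : Int) - 1)).toNat = i + k + 1 := by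
          omega
        obtain ⟨u, x, y, v, hRx, hu⟩ := pvDecomp k R (by rw [hR]; omega)
        have hgetk : R.getD k 0 = x := by rw [hRx, ← hu]; exact pvGetDAt _ _ _
        have herasek : R.eraseIdx k = u ++ y :: v := by rw [hRx, ← hu]; exact pvEraseAt _ _ _
        have ha : (S ++ (R.getD k 0 :: R.eraseIdx k))[i]?.getD 0 = x := by
          rw [hgetk, ← hS]; exact pvIdxAt _ _ _
        have hb : (S ++ (R.getD k 0 :: R.eraseIdx k))[i + k + 1]?.getD 0 = y := by
          rw [hgetk, herasek]
          rw [show S ++ (x :: (u ++ y :: v)) = (S ++ x :: u) ++ y :: v by simp]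
          rw [show i + k + 1 = (S ++ x :: u).length by
            simp only [List.length_append, List.length_cons, hS, hu]; omega]
          exact pvIdxAt _ _ _
        have hset : (((S ++ (R.getD k 0 :: R.eraseIdx k)).set i y).set (i + k + 1) x)
            = S ++ (y :: (u ++ x :: v)) := by
          rw [hgetk, herasek]
          rw [show i = S.length from hS.symm, pvSetAt]
          rw [show S ++ (y :: (u ++ y :: v)) = (S ++ y :: u) ++ y :: v by simp]
          rw [show S.length + k + 1 = (S ++ y :: u).length by
            simp only [List.length_append, List.length_cons, hS]; omega]
          rw [pvSetAt]
          simp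
        have htarget : pvEnc rem0 ((q ++ [k + 1]) ++ List.replicate (r - (i + 1)) 0)
            = S ++ (y :: (u ++ x :: v)) := by
          rw [show (q ++ [k + 1]) ++ List.replicate (r - (i + 1)) 0 = q ++ ((k + 1) :: zs) by simp [hzs]]
          rw [pvEnc_append, ← hRdef, ← hSdef]
          congr 1
          rw [show pvEnc R ((k + 1) :: zs) = R.getD (k + 1) 0 :: pvEnc (R.eraseIdx (k + 1)) zs from rfl]
          have h1 : R.getD (k + 1) 0 = y := by
            rw [hRx, show u ++ x :: y :: v = (u ++ [x]) ++ y :: v by simp,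
              show k + 1 = (u ++ [x]).length by simp [hu]]
            exact pvGetDAt _ _ _
          have h2 : R.eraseIdx (k + 1) = u ++ x :: v := by
            rw [hRx, show u ++ x :: y :: v = (u ++ [x]) ++ y :: v by simp,
              show k + 1 = (u ++ [x]).length by simp [hu]]
            rw [pvEraseAt]
            simp
          rw [h1, h2, hzs, pvEnc_replicate]
          simp only [List.length_append, List.length_cons]
          have : R.length = u.length + (1 + (1 + v.length)) := by rw [hRx]; simp; omega
          omega
        have hcycset : (pvCyc (np : Int) 0 q ++ (((np : Int) - i - k) :: pvCyc (np : Int) (i + 1) zs)).set i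
              ((np : Int) - (i : Int) - (k : Int) - 1)
            = pvCyc (np : Int) 0 ((q ++ [k + 1]) ++ List.replicate (r - (i + 1)) 0) := by
          conv_lhs => rw [← hcyclen]
          rw [pvSetAt]
          rw [show (q ++ [k + 1]) ++ List.replicate (r - (i + 1)) 0 = q ++ ((k + 1) :: zs) by simp [hzs]]
          rw [pvCyc_append, hq]
          rw [show ((0 : Int) + (i : Nat)) = (i : Int) by ring]
          rw [show pvCyc (np : Int) (i : Int) ((k + 1) :: zs)
              = ((np : Int) - (i : Int) - ((k + 1 : Nat) : Int)) :: pvCyc (np : Int) ((i : Int) + 1) zs from rfl]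
          simp only [hcyclen]
          congr 2
          push_cast
          ring
        have hincr : pvIncr (pvMx np (i + 1)) (q ++ [k]) = some (q ++ [k + 1]) := by
          rw [hmx, pvIncr_snoc _ _ _ _ (by rw [pvMx_length]; omega), if_pos (by omega)]
        rw [hincr]
        rw [hzs] at hcycset
        simp only [hzs, hp, ha, hb, hset, hcycset, htarget]
        try rfl
      · -- rotation case: digit i was at its maximum; rotate back and carry left
        have hkMe : k = M := by omega
        have hceq : ((np : Int) - (i : Int) - (k : Int) - 1 = 0) := by
          rw [hkMe, hM]; omega
        simp only [if_pos hceq]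
        rcases List.eq_nil_or_concat R with hRnil | ⟨u, x, hRx⟩
        · rw [hRnil] at hR; simp at hR; omega
        rw [List.concat_eq_append] at hRx
        have hu : u.length = k := by
          have : R.length = u.length + 1 := by rw [hRx]; simp
          omega
        have hgetk : R.getD k 0 = x := by
          rw [hRx, ← hu, show u ++ [x] = u ++ x :: ([] : List Int) from rfl]
          exact pvGetDAt _ _ _
        have herasek : R.eraseIdx k = u := by
          rw [hRx, ← hu, show u ++ [x] = u ++ x :: ([] : List Int) from rfl, pvEraseAt]
          simp
        have htake : (S ++ (R.getD k 0 :: R.eraseIdx k)).take i = S := by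
          conv_lhs => rw [← hS]
          exact List.take_left
        have hdrop1 : (S ++ (R.getD k 0 :: R.eraseIdx k)).drop (i + 1) = R.eraseIdx k := by
          rw [show S ++ (R.getD k 0 :: R.eraseIdx k) = (S ++ [R.getD k 0]) ++ R.eraseIdx k by simp]
          rw [show i + 1 = (S ++ [R.getD k 0]).length by simp [hS]]
          exact List.drop_left
        have hdrop0 : ((S ++ (R.getD k 0 :: R.eraseIdx k)).drop i).take 1 = [R.getD k 0] := by
          conv_lhs => rw [← hS]; rw [List.drop_left]
          rfl
        have hrot : S ++ R.eraseIdx k ++ [R.getD k 0]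
            = pvEnc rem0 (q ++ List.replicate (r - i) 0) := by
          rw [pvEnc_append, ← hRdef, ← hSdef, pvEnc_replicate R (r - i) (by omega)]
          rw [hgetk, herasek, hRx]
          simp
        have hcycrot : ((pvCyc (np : Int) 0 q ++ (((np : Int) - i - k) :: pvCyc (np : Int) (i + 1) zs)).set i
                (((np : Int) - i - k) - 1)).set i ((np : Int) - (i : Int))
            = pvCyc (np : Int) 0 (q ++ List.replicate (r - i) 0) := by
          rw [List.set_set]
          conv_lhs => rw [← hcyclen]
          rw [pvSetAt]
          rw [pvCyc_append, hq]
          rw [show ((0 : Int) + (i : Nat)) = (i : Int) by ring]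
          rw [show List.replicate (r - i) (0 : Nat) = 0 :: zs by
            rw [hzs, ← List.replicate_succ]; congr 1; omega]
          rw [show pvCyc (np : Int) (i : Int) (0 :: zs)
              = ((np : Int) - (i : Int) - ((0 : Nat) : Int)) :: pvCyc (np : Int) ((i : Int) + 1) zs from rfl]
          simp only [hcyclen]
          congr 2
          push_cast
          ring
        rw [htake, hdrop1, hdrop0, hrot, hcycrot]
        rw [ih q (by omega) hq hokq]
        have hincr : pvIncr (pvMx np (i + 1)) (q ++ [k])
            = (pvIncr (pvMx np i) q).map (· ++ [0]) := by
          rw [hmx, pvIncr_snoc _ _ _ _ (by rw [pvMx_length]; omega), if_neg (by omega)]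
        rw [hincr]
        cases hq' : pvIncr (pvMx np i) q with
        | none => simp
        | some q' =>
            simp only [Option.map_some]
            have hpre : (q' ++ [0]) ++ List.replicate (r - (i + 1)) 0
                = q' ++ List.replicate (r - i) 0 := by
              rw [show List.replicate (r - i) (0 : Nat) = 0 :: List.replicate (r - (i + 1)) 0 by
                rw [← List.replicate_succ]; congr 1; omega]
              simp
            rw [hpre]


-- the while-loop walks the lexicographic successor chain
theorem pvOuter_run (pool : List Int) (r : Nat) (hr : r ≤ pool.length) :
    ∀ (fuel : Nat) (ks : List Nat), ks.length = r → pvOK (pvMx pool.length r) ks →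
    (pvTail (pvMx pool.length r) ks).length < fuel →
    pvOuter pool (pool.length : Int) r fuel
        (pvEnc ((List.range pool.length).map Int.ofNat) ks)
        (pvCyc (pool.length : Int) 0 ks)
      = (pvTail (pvMx pool.length r) ks).map
          (fun ks' => (pvSel ((List.range pool.length).map Int.ofNat) ks').map (pvPoolGet pool)) := by
  intro fuel
  induction fuel with
  | zero => intro ks _ _ h; omega
  | succ fuel ihf =>
      intro ks hks hok hfuel
      have hstep := pvInner_step pool r hr r ks (le_refl r) hks hok
      rw [Nat.sub_self] at hstep
      simp only [List.replicate_zero, List.append_nil] at hstep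
      cases hq' : pvIncr (pvMx pool.length r) ks with
      | none =>
          rw [hq'] at hstep
          simp only [pvOuter, hstep]
          rw [pvTail_nil _ _ hok hq']
          rfl
      | some ks' =>
          rw [hq'] at hstep
          simp only [pvOuter, hstep]
          rw [pvTail_cons _ _ _ hok hq']
          simp only [List.map_cons]
          have hlen' : ks'.length = r := by rw [pvIncr_length _ _ _ hok hq', hks]
          have hok' : pvOK (pvMx pool.length r) ks' := pvIncr_ok _ _ _ hok hq'
          congr 1
          · rw [show r = ks'.length from hlen'.symm, pvEnc_take]
          · apply ihf ks' hlen' hok'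
            rw [pvTail_cons _ _ _ hok hq'] at hfuel
            simp at hfuel
            omega

-- B's recursion enumerates exactly the lexicographic selections
theorem pvPermsB_eq : ∀ (rt : Nat) (lst : List Int) (r : Int), r = (rt : Int) → rt ≤ lst.length →
    pvPermsB lst r = (pvAll (pvMx lst.length rt)).map (pvSel lst) := by
  intro rt
  induction rt with
  | zero =>
      intro lst r hr _
      subst hr
      rw [pvPermsB]
      simp [pvMx, pvAll, pvSel]
  | succ rt ih =>
      intro lst r hr hle
      subst hr
      rw [pvPermsB, if_neg (by omega : ¬((rt + 1 : Nat) : Int) ≤ 0)]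
      have hlen1 : 1 ≤ lst.length := by omega
      -- peel off the attach
      rw [show ((List.range lst.length).attach.flatMap (fun i =>
            (pvPermsB (lst.take i.1 ++ lst.drop (i.1 + 1)) (((rt + 1 : Nat) : Int) - 1)).map
              (fun p => (lst[i.1]?.getD 0) :: p)))
          = ((List.range lst.length).attach.map Subtype.val).flatMap (fun k =>
            (pvPermsB (lst.take k ++ lst.drop (k + 1)) (((rt + 1 : Nat) : Int) - 1)).map
              (fun p => (lst[k]?.getD 0) :: p)) by rw [List.flatMap_map]]
      rw [List.attach_map_subtype_val]
      -- right-hand side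
      rw [show pvMx lst.length (rt + 1) = (lst.length - 1) :: pvMx (lst.length - 1) rt from rfl]
      rw [show pvAll ((lst.length - 1) :: pvMx (lst.length - 1) rt)
          = (List.range ((lst.length - 1) + 1)).flatMap
              (fun k => (pvAll (pvMx (lst.length - 1) rt)).map (k :: ·)) from rfl]
      rw [show lst.length - 1 + 1 = lst.length by omega]
      rw [List.map_flatMap]
      apply List.flatMap_congr
      intro k hk
      have hklt : k < lst.length := List.mem_range.mp hk
      have hrest : (lst.take k ++ lst.drop (k + 1)) = lst.eraseIdx k := by
        rw [List.eraseIdx_eq_take_drop_succ]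
      have hrlen : rt ≤ (lst.eraseIdx k).length := by
        rw [List.length_eraseIdx]
        simp [hklt]
        omega
      rw [hrest, show ((rt + 1 : Nat) : Int) - 1 = (rt : Int) by push_cast; ring,
        ih (lst.eraseIdx k) (rt : Int) rfl hrlen]
      rw [show (lst.eraseIdx k).length = lst.length - 1 by
        rw [List.length_eraseIdx]; simp [hklt]]
      simp only [List.map_map]
      apply List.map_congr_left
      intro ks _
      simp only [Function.comp]
      rw [show pvSel lst (k :: ks) = lst.getD k 0 :: pvSel (lst.eraseIdx k) ks from rfl]
      rw [List.getD_eq_getElem?_getD]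

-- the initial cycles list range(n, n-r, -1) is the cycles encoding of the zero vector
theorem pvCyc_init (n : Int) : ∀ (t : Nat) (j : Int),
    pvCyc n j (List.replicate t 0) = PySem.List.pyRange (n - j) (n - j - t) (-1) := by
  intro t
  induction t with
  | zero =>
      intro j
      rw [PySem.List.pyRange_neg_one_eq_nil (by push_cast; omega)]
      rfl
  | succ t ih =>
      intro j
      rw [show List.replicate (t + 1) (0 : Nat) = 0 :: List.replicate t 0 from rfl]
      rw [show pvCyc n j (0 :: List.replicate t 0)
          = (n - j - ((0 : Nat) : Int)) :: pvCyc n (j + 1) (List.replicate t 0) from rfl]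
      rw [ih (j + 1)]
      rw [show ((t + 1 : Nat) : Int) = (t : Int) + 1 by push_cast; ring]
      have hlt : n - j - ((t : Int) + 1) < n - j := by omega
      rw [PySem.List.pyRange_neg_one_cons hlt]
      congr 1
      · push_cast; ring
      · congr 1 <;> push_cast <;> ring

theorem pvRem0_map (pool : List Int) :
    (((List.range pool.length).map Int.ofNat).map (pvPoolGet pool)) = pool := by
  rw [List.map_map]
  apply List.ext_getElem (by simp)
  intro n h1 h2
  simp only [List.getElem_map, List.getElem_range, Function.comp]
  show pvPoolGet pool (Int.ofNat n) = pool[n]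
  unfold pvPoolGet
  rw [show Int.ofNat n = ((n : Nat) : Int) from rfl, PySem.List.pyGet?_natCast]
  rw [List.getElem?_eq_getElem h2]
  rfl

theorem pvFoldSum : ∀ (L : List Int) (init : Int),
    L.foldl (fun s x => s + x) init = init + L.sum := by
  intro L
  induction L with
  | nil => intro init; simp
  | cons a L ih => intro init; simp [List.foldl_cons, ih]; ring

theorem pvCurrSum (L : List Int) :
    (PySem.List.pyRange 0 (L.length : Int) 1).foldl
      (fun s j => s + PySem.List.pyGetD L j 0) 0 = L.sum := by
  rw [PySem.List.foldl_pyRange_zero_pyGetD' L 0 (fun s x => s + x) 0]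
  rw [pvFoldSum]
  ring

-- main equality of the two permutation generators (nonempty pool, r = len - 1)
theorem pvPerm_main (pool : List Int) (hne : pool ≠ []) :
    pvPermutationsList pool ((pool.length : Int) - 1) = pvPermsB pool ((pool.length : Int) - 1) := by
  have hnp1 : 0 < pool.length := List.length_pos_iff.mpr hne
  set np := pool.length with hnp
  set r := np - 1 with hrdef
  have hrle : r ≤ np := by omega
  have hcast : (np : Int) - 1 = (r : Int) := by omega
  rw [hcast]
  have hrle' : r ≤ pool.length := hnp ▸ hrle
  rw [pvPermsB_eq r pool (r : Int) rfl hrle']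
  simp only [pvPermutationsList]
  rw [if_neg (by push_cast; omega : ¬((r : Int) > (pool.length : Int)))]
  rw [if_neg (by push_cast; omega : ¬((pool.length : Int) = (0 : Int)))]
  set rem0 : List Int := (List.range pool.length).map Int.ofNat with hrem0
  have hrem0len : rem0.length = np := by simp [hrem0, ← hnp]
  set ms := pvMx np r with hms
  set z : List Nat := List.replicate r 0 with hz
  have hzlen : z.length = r := by simp [hz]
  have hokz : pvOK ms z := by
    have h := pvOK_zeros ms
    rwa [List.map_const', show ms.length = r by rw [hms, pvMx_length], ← hz] at h
  have hcyc0 : PySem.List.pyRange (pool.length : Int) ((pool.length : Int) - (r : Int)) (-1)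
      = pvCyc (np : Int) 0 z := by
    rw [hz, pvCyc_init (np : Int) r 0, ← hnp]
    norm_num
  have henc0 : pvEnc rem0 z = rem0 := by
    rw [hz, pvEnc_replicate _ _ (by omega)]
  have hmemle : ∀ m ∈ ms, m + 1 ≤ np := by
    intro m hm
    have := pvMx_mem_le r np m (by rwa [← hms])
    omega
  have hfuel : (pvTail ms z).length < pool.length ^ pool.length + 1 := by
    rw [← hnp]
    have h1 : (pvAll ms).length = (pvTail ms z).length + 1 := by
      conv_lhs => rw [pvAll_zero ms]
      rw [show (ms.map (fun _ => 0)) = z by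
        rw [List.map_const', show ms.length = r by rw [hms, pvMx_length], ← hz]]
      simp
    have h2 : (pvAll ms).length ≤ np ^ ms.length := pvAll_len_le ms np hmemle
    have h3 : np ^ ms.length ≤ np ^ np := by
      apply Nat.pow_le_pow_right (by omega)
      rw [hms, pvMx_length]; omega
    omega
  have houter := pvOuter_run pool r hrle' (pool.length ^ pool.length + 1) z hzlen hokz hfuel
  rw [henc0] at houter
  rw [show Int.toNat (r : Int) = r by omega]
  rw [hcyc0, houter]
  have hfirst : PySem.List.slice rem0 none (some (r : Int)) = pvSel rem0 z := by
    rw [PySem.List.slice_to_natCast, hz, pvSel_replicate _ _ (by omega)]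
  rw [hfirst]
  rw [show ((pvSel rem0 z).map (pvPoolGet pool)) :: (pvTail ms z).map
        (fun ks' => (pvSel rem0 ks').map (pvPoolGet pool))
      = (z :: pvTail ms z).map (fun ks' => (pvSel rem0 ks').map (pvPoolGet pool)) from rfl]
  rw [show z :: pvTail ms z = pvAll ms by
    conv_rhs => rw [pvAll_zero ms]
    rw [show (ms.map (fun _ => 0)) = z by
      rw [List.map_const', show ms.length = r by rw [hms, pvMx_length], ← hz]]]
  apply List.map_congr_left
  intro ks hks
  have hok := pvAll_mem_ok ms ks hks
  have hkslen : ks.length = r := by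
    rw [← List.Forall₂.length_eq hok, hms, pvMx_length]
  rw [pvSel_map (pvPoolGet pool) ks rem0 np hrem0len (by omega)
    (by rw [hkslen, ← hms]; exact hok)]
  rw [hrem0, pvRem0_map]


-- ===== VERDICT (by name: the statement is the Claim_ definition above) =====
theorem generateValidRows_spec : Claim_equal_generateValidRows := by
  intro row _
  unfold Spec_generateValidRows
  show generateValidRows row = generateValidRows_alt row
  cases row with
  | nil =>
      show generateValidRows [] = generateValidRows_alt []
      simp only [generateValidRows, generateValidRows_alt]
      rw [show ((([] : List Int).length : Int) - 1) = (-1 : Int) by simp]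
      rw [show pvPermutationsList [] (-1) = [[]] from by
        simp [pvPermutationsList, PySem.List.slice_to_neg_one]]
      rw [show pvPermsB [] (-1) = [[]] from by rw [pvPermsB]; simp]
      simp [pvCurrSum]
  | cons a t =>
      have hne : (a :: t) ≠ [] := by simp
      simp only [generateValidRows, generateValidRows_alt]
      rw [pvPerm_main _ hne]
      apply List.map_congr_left
      intro p _
      rw [pvCurrSum p]
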